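-- pv_equiv track=rewrite | github.com/quocpn1997/shakespeare-aware-language-model | src/rag_chatbot.py | detect_play
-- ===== SOURCE A (Python) =====
-- from typing import Any, Dict, List, Tuple
--
-- PLAY_KEYWORDS: Dict[str, Tuple[str, ...]] = {
--     "Macbeth": (
--         "macbeth", "duncan", "banquo", "macduff", "lady macbeth", "malcolm",
--         "donalbain", "fleance", "hecate", "lennox", "ross", "siward",
--         "dunsinane", "birnam", "cawdor", "glamis", "scone",
--     ),
--     "Hamlet": (
--         "hamlet", "claudius", "gertrude", "ophelia", "polonius", "laertes",
--         "horatio", "rosencrantz", "guildenstern", "fortinbras", "yorick",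
--         "denmark", "elsinore",
--     ),
--     "Romeo and Juliet": (
--         "romeo", "juliet", "tybalt", "mercutio", "benvolio", "capulet",
--         "montague", "paris", "rosaline", "friar lawrence", "friar laurence",
--         "verona",
--     ),
-- }
--
-- def detect_play(query: str) -> str | None:
--     """
--     Return the canonical play name if the query clearly refers to one play.
--
--     Counts how many play-specific keywords appear in the query for each play,
--     returns the winner if there is a unique top scorer. Returns None for
--     ambiguous queries (no keywords matched, or a tie) — in that case the
--     caller should retrieve without a play filter.
--     """
--     query_lower = query.lower()
--     scores = {
--         play: sum(1 for kw in keywords if kw in query_lower)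
--         for play, keywords in PLAY_KEYWORDS.items()
--     }
--     scores = {p: s for p, s in scores.items() if s > 0}
--     if not scores:
--         return None
--     top_score = max(scores.values())
--     top_plays = [p for p, s in scores.items() if s == top_score]
--     return top_plays[0] if len(top_plays) == 1 else None
-- ===== SOURCE B (Python) =====
-- from typing import Dict, Tuple
--
-- PLAY_KEYWORDS: Dict[str, Tuple[str, ...]] = {
--     "Macbeth": (
--         "macbeth", "duncan", "banquo", "macduff", "lady macbeth", "malcolm",
--         "donalbain", "fleance", "hecate", "lennox", "ross", "siward",
--         "dunsinane", "birnam", "cawdor", "glamis", "scone",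
--     ),
--     "Hamlet": (
--         "hamlet", "claudius", "gertrude", "ophelia", "polonius", "laertes",
--         "horatio", "rosencrantz", "guildenstern", "fortinbras", "yorick",
--         "denmark", "elsinore",
--     ),
--     "Romeo and Juliet": (
--         "romeo", "juliet", "tybalt", "mercutio", "benvolio", "capulet",
--         "montague", "paris", "rosaline", "friar lawrence", "friar laurence",
--         "verona",
--     ),
-- }
--
-- def detect_play(query: str) -> str | None:
--     query_lower = query.lower()
--     best_score, best_play, best_count = 0, None, 0
--     for play, keywords in PLAY_KEYWORDS.items():
--         score = sum(kw in query_lower for kw in keywords)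
--         if score > best_score:
--             best_score, best_play, best_count = score, play, 1
--         elif score == best_score and score > 0:
--             best_count += 1
--     return best_play if best_score > 0 and best_count == 1 else None
-- ===== Notes on version B (the rewrite author's own statement) =====
-- stated objective: alternative
-- what changed: Replaced the three-pass dict pipeline (score dict comprehension, positive filter, max + tie list) with a single loop over PLAY_KEYWORDS that tracks best_score/best_play/best_count online and returns the unique positive winner.
import Mathlib
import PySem

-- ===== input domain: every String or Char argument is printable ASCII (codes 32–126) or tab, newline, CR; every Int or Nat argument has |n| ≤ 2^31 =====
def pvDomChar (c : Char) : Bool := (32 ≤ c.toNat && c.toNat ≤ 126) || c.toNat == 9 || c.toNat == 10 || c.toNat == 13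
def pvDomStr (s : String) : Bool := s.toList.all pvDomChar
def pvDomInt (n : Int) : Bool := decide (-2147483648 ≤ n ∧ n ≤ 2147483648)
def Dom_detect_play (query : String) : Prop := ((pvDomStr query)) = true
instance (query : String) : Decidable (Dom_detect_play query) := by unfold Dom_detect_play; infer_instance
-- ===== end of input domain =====

-- B replaces A's three-pass score-dict / filter / max+tie-list pipeline with a single fold that
-- tracks the best score, best play and tie count online (alternative decomposition, same cost).


-- PLAY_KEYWORDS, shared module constant of both programs
def pvKwsM : List String :=
  ["macbeth", "duncan", "banquo", "macduff", "lady macbeth", "malcolm",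
   "donalbain", "fleance", "hecate", "lennox", "ross", "siward",
   "dunsinane", "birnam", "cawdor", "glamis", "scone"]
def pvKwsH : List String :=
  ["hamlet", "claudius", "gertrude", "ophelia", "polonius", "laertes",
   "horatio", "rosencrantz", "guildenstern", "fortinbras", "yorick",
   "denmark", "elsinore"]
def pvKwsR : List String :=
  ["romeo", "juliet", "tybalt", "mercutio", "benvolio", "capulet",
   "montague", "paris", "rosaline", "friar lawrence", "friar laurence",
   "verona"]
def PLAY_KEYWORDS : List (String × List String) :=
  [("Macbeth", pvKwsM), ("Hamlet", pvKwsH), ("Romeo and Juliet", pvKwsR)]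

-- ===== PORT A =====
-- sum(1 for kw in keywords if kw in query_lower)
def pvSumScore (ql : String) (kws : List String) : Int :=
  (kws.map (fun kw => if PySem.Str.isIn kw ql then (1 : Int) else 0)).sum

def detect_play (query : String) : Option String :=
  let query_lower := PySem.Str.lower query
  -- scores = {play: sum(...) for play, keywords in PLAY_KEYWORDS.items()} (distinct literal keys)
  let scores : List (String × Int) :=
    PLAY_KEYWORDS.map (fun pk => (pk.1, pvSumScore query_lower pk.2))
  -- scores = {p: s for p, s in scores.items() if s > 0}
  let scores := scores.filter (fun ps => 0 < ps.2)
  if scores.isEmpty then none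
  else
    match PySem.List.max? (scores.map Prod.snd) (fun x => x) with
    | none => none  -- unreachable: scores nonempty
    | some top_score =>
      let top_plays := (scores.filter (fun ps => ps.2 == top_score)).map Prod.fst
      if top_plays.length == 1 then top_plays[0]? else none

-- ===== PORT B =====
def detect_play_alt (query : String) : Option String :=
  let ql := PySem.Str.lower query
  let st : Int × Option String × Int :=
    PLAY_KEYWORDS.foldl (fun st pk =>
      let score : Int := (pk.2.countP (fun kw => PySem.Str.isIn kw ql) : Int)
      if st.1 < score then (score, some pk.1, 1)
      else if score = st.1 ∧ 0 < score then (st.1, st.2.1, st.2.2 + 1)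
      else st) (0, none, 0)
  if 0 < st.1 ∧ st.2.2 = 1 then st.2.1 else none

-- ===== PRECONDITION & SPEC =====
def Spec_detect_play (query : String) (out : Option String) : Prop := out = detect_play_alt query
instance (query : String) (out : Option String) : Decidable (Spec_detect_play query out) := by unfold Spec_detect_play; infer_instance

-- ===== CLAIM (what is proved, stated in full; the proofs are below) =====
def Claim_equal_detect_play : Prop := ∀ (query : String), Dom_detect_play query → Spec_detect_play query (detect_play query)

-- ===== LEMMAS AND PROOFS =====

-- A's result as a function of the three keyword counts
def pvCoreA (n1 n2 n3 : Int) : Option String :=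
  let scores : List (String × Int) :=
    [("Macbeth", n1), ("Hamlet", n2), ("Romeo and Juliet", n3)]
  let scores := scores.filter (fun ps => 0 < ps.2)
  if scores.isEmpty then none
  else
    match PySem.List.max? (scores.map Prod.snd) (fun x => x) with
    | none => none
    | some top_score =>
      let top_plays := (scores.filter (fun ps => ps.2 == top_score)).map Prod.fst
      if top_plays.length == 1 then top_plays[0]? else none

-- B's result as a function of the three keyword counts
def pvCoreB (n1 n2 n3 : Int) : Option String :=
  let st : Int × Option String × Int :=
    [(("Macbeth" : String), n1), ("Hamlet", n2), ("Romeo and Juliet", n3)].foldl (fun st pk =>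
      if st.1 < pk.2 then (pk.2, some pk.1, 1)
      else if pk.2 = st.1 ∧ 0 < pk.2 then (st.1, st.2.1, st.2.2 + 1)
      else st) (0, none, 0)
  if 0 < st.1 ∧ st.2.2 = 1 then st.2.1 else none

lemma pvSumScore_eq (ql : String) (kws : List String) :
    pvSumScore ql kws = (kws.countP (fun kw => PySem.Str.isIn kw ql) : Int) := by
  induction kws with
  | nil => simp [pvSumScore]
  | cons k t ih =>
    simp only [pvSumScore, List.map_cons, List.sum_cons, List.countP_cons] at ih ⊢
    rw [ih]
    push_cast
    by_cases h : PySem.Str.isIn k ql <;> simp [h] <;> ring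

def pvC (ql : String) (kws : List String) : Int :=
  (kws.countP (fun kw => PySem.Str.isIn kw ql) : Int)

lemma detect_play_eq_core (query : String) :
    detect_play query = pvCoreA (pvC (PySem.Str.lower query) pvKwsM)
      (pvC (PySem.Str.lower query) pvKwsH) (pvC (PySem.Str.lower query) pvKwsR) := by
  simp only [detect_play, pvCoreA, pvC, PLAY_KEYWORDS, List.map, pvSumScore_eq]

lemma detect_play_alt_eq_core (query : String) :
    detect_play_alt query = pvCoreB (pvC (PySem.Str.lower query) pvKwsM)
      (pvC (PySem.Str.lower query) pvKwsH) (pvC (PySem.Str.lower query) pvKwsR) := by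
  simp only [detect_play_alt, pvCoreB, pvC, PLAY_KEYWORDS, List.foldl]

lemma pvCore_eq : ∀ a : Nat, a < 18 → ∀ b : Nat, b < 14 → ∀ c : Nat, c < 13 →
    pvCoreA (a : Int) (b : Int) (c : Int) = pvCoreB (a : Int) (b : Int) (c : Int) := by
  decide

lemma pvCount_lt (ql : String) : ∀ kws : List String,
    kws.countP (fun kw => PySem.Str.isIn kw ql) < kws.length + 1 := by
  intro kws
  have := List.countP_le_length (l := kws) (p := fun kw => PySem.Str.isIn kw ql)
  omega

lemma detect_play_spec' (query : String) :
    detect_play query = detect_play_alt query := by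
  rw [detect_play_eq_core, detect_play_alt_eq_core]
  have h1 := pvCount_lt (PySem.Str.lower query) pvKwsM
  have h2 := pvCount_lt (PySem.Str.lower query) pvKwsH
  have h3 := pvCount_lt (PySem.Str.lower query) pvKwsR
  simp only [pvKwsM, pvKwsH, pvKwsR, List.length_cons, List.length_nil] at h1 h2 h3
  exact pvCore_eq _ h1 _ h2 _ h3

-- ===== VERDICT (by name: the statement is the Claim_ definition above) =====
theorem detect_play_spec : Claim_equal_detect_play := by
  intro query _
  exact detect_play_spec' query
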